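-- pv_equiv track=rewrite | github.com/yichen928/Multivariate_Shapley_Interactions | accuracy_evaluation/compute_interaction_diff_bert.py | measure_coalition
-- ===== SOURCE A (Python) =====
-- def measure_coalition(g_sample):
--     """
--     :param g_sample: sampled g
--     :return: lambda i
--     """
--     sizes = [1 for i in range(len(g_sample)+1)]
--     l = 0
--     size = 0
--     for i in range(len(g_sample)):
--         if g_sample[i] > 0:
--             size += 1
--         else:
--             for j in range(l,i+1):
--                 sizes[j] += size
--             size = 0
--             l = i+1
--     for j in range(l, len(sizes)):
--         sizes[j] += size
--     return sizes
-- ===== SOURCE B (Python) =====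
-- def measure_coalition(g_sample):
--     """
--     :param g_sample: sampled g
--     :return: lambda i
--     """
--     n = len(g_sample)
--     diff = [0] * (n + 2)
--     l = 0
--     for i, x in enumerate(g_sample):
--         if x <= 0:
--             diff[l] += i - l
--             diff[i + 1] -= i - l
--             l = i + 1
--     diff[l] += n - l
--     acc = 0
--     out = []
--     for j in range(n + 1):
--         acc += diff[j]
--         out.append(1 + acc)
--     return out
-- ===== Notes on version B (the rewrite author's own statement) =====
-- stated objective: alternative
-- what changed: B replaces A's in-place range additions (an inner loop adding the run size to every index of each closed run) by a difference array updated in O(1) per run boundary followed by one prefix-sum pass that produces the output.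
import Mathlib
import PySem

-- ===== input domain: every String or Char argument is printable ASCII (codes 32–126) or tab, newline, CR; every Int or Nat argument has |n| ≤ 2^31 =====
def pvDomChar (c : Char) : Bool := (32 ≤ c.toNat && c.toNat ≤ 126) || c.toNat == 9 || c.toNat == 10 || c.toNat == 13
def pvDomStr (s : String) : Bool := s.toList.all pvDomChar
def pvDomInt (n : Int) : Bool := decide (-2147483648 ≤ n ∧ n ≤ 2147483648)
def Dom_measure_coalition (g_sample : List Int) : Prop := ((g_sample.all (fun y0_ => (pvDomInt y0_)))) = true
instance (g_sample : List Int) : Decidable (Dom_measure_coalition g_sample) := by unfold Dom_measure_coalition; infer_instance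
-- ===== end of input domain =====

-- B replaces A's in-place range additions by a difference array (two O(1) updates per run)
-- followed by one prefix-sum pass; objective: alternative algorithm, same O(n) cost.

-- ===== PORT A =====
-- 'for j in range(l, hi): sizes[j] += size' — in-place range addition on the sizes list
def pvAddRange (size : Int) (sizes : List Int) (l hi : Nat) : List Int :=
  (List.range' l (hi - l)).foldl (fun s j => s.set j (s.getD j 0 + size)) sizes

def measure_coalition (g_sample : List Int) : List Int :=
  let n := g_sample.length
  let st := (List.range n).foldl
    (fun (st : List Int × Nat × Int) i =>
      let (sizes, l, size) := st
      if g_sample.getD i 0 > 0 then (sizes, l, size + 1)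
      else (pvAddRange size sizes l (i + 1), i + 1, 0))
    (List.replicate (n + 1) 1, 0, 0)
  pvAddRange st.2.2 st.1 st.2.1 (n + 1)

-- ===== PORT B =====
-- loop body of 'for i, x in enumerate(g_sample): if x <= 0: diff[l] += i-l; diff[i+1] -= i-l; l = i+1'
def pvDiffStep (st : List Int × Nat) (p : Int × Nat) : List Int × Nat :=
  if p.1 ≤ 0 then
    let s : Int := (p.2 : Int) - (st.2 : Int)
    let d1 := st.1.set st.2 (st.1.getD st.2 0 + s)
    (d1.set (p.2 + 1) (d1.getD (p.2 + 1) 0 - s), p.2 + 1)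
  else st

def measure_coalition_alt (g_sample : List Int) : List Int :=
  let n := g_sample.length
  let st := g_sample.zipIdx.foldl pvDiffStep (List.replicate (n + 2) 0, 0)
  let diff := st.1.set st.2 (st.1.getD st.2 0 + ((n : Int) - (st.2 : Int)))
  ((List.range (n + 1)).foldl
    (fun (s : Int × List Int) j =>
      let a := s.1 + diff.getD j 0
      (a, s.2 ++ [1 + a])) (0, [])).2

-- ===== PRECONDITION & SPEC =====
def Spec_measure_coalition (g_sample : List Int) (out : List Int) : Prop := out = measure_coalition_alt g_sample
instance (g_sample : List Int) (out : List Int) : Decidable (Spec_measure_coalition g_sample out) := by unfold Spec_measure_coalition; infer_instance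

-- ===== CLAIM (what is proved, stated in full; the proofs are below) =====
def Claim_equal_measure_coalition : Prop := ∀ (g_sample : List Int), Dom_measure_coalition g_sample → Spec_measure_coalition g_sample (measure_coalition g_sample)

-- ===== LEMMAS AND PROOFS =====

-- canonical description both ports are proved equal to: output built run by run
def pvRunStep (st : List Int × Int) (x : Int) : List Int × Int :=
  if x > 0 then (st.1, st.2 + 1)
  else (st.1 ++ List.replicate (st.2 + 1).toNat (st.2 + 1), 0)

def pvRuns (g : List Int) : List Int :=
  let st := g.foldl pvRunStep ([], 0)
  st.1 ++ List.replicate (st.2 + 1).toNat (st.2 + 1)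

-- first-difference list: pvDelta p [a,b,c] = [a-p, b-a, c-b]
def pvDelta (prev : Int) : List Int → List Int
  | [] => []
  | a :: t => (a - prev) :: pvDelta a t

theorem pvDelta_length (prev : Int) (xs : List Int) : (pvDelta prev xs).length = xs.length := by
  induction xs generalizing prev with
  | nil => rfl
  | cons a t ih => simp [pvDelta, ih]

theorem getLastD_cons' (a p : Int) (t : List Int) : (a :: t).getLastD p = t.getLastD a := by
  cases t <;> simp [List.getLastD]

theorem getLastD_replicate' (v : Int) (r : Nat) : (List.replicate r v).getLastD v = v := by
  induction r with
  | zero => rfl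
  | succ r ih => rw [List.replicate_succ, getLastD_cons', ih]

theorem pvDelta_append (prev : Int) (xs ys : List Int) :
    pvDelta prev (xs ++ ys) = pvDelta prev xs ++ pvDelta (xs.getLastD prev) ys := by
  induction xs generalizing prev with
  | nil => rfl
  | cons a t ih =>
    rw [List.cons_append]
    simp only [pvDelta, ih a, getLastD_cons']
    rfl

theorem pvDelta_replicate (v : Int) (c : Nat) :
    pvDelta v (List.replicate c v) = List.replicate c 0 := by
  induction c with
  | zero => rfl
  | succ c ih => simp [List.replicate_succ, pvDelta, ih]

theorem getD_mid (xs : List Int) (y : Int) (ys : List Int) :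
    (xs ++ y :: ys).getD xs.length 0 = y := by
  induction xs with
  | nil => rfl
  | cons a t ih => simpa using ih

theorem set_mid (xs : List Int) (y : Int) (ys : List Int) (z : Int) :
    (xs ++ y :: ys).set xs.length z = xs ++ z :: ys := by
  induction xs with
  | nil => rfl
  | cons a t ih => simp [ih]

theorem foldl_range_getD (diff : List Int) :
    ∀ (m : Nat) (init : Int × List Int), m ≤ diff.length →
    (List.range m).foldl
        (fun (s : Int × List Int) j =>
          (s.1 + diff.getD j 0, s.2 ++ [1 + (s.1 + diff.getD j 0)])) init
      = (diff.take m).foldl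
        (fun (s : Int × List Int) d => (s.1 + d, s.2 ++ [1 + (s.1 + d)])) init := by
  intro m
  induction m with
  | zero => intro init _; simp
  | succ m ih =>
    intro init h
    have hm : m < diff.length := by omega
    rw [List.range_succ, List.foldl_append, ih init (by omega)]
    have : diff.take (m + 1) = diff.take m ++ [diff[m]] := by
      rw [List.take_add_one]; simp [List.getElem?_eq_getElem hm]
    rw [this, List.foldl_append]
    simp [List.getD, List.getElem?_eq_getElem hm]

-- prefix-summing a first-difference list recovers the values
theorem foldl_delta (vals : List Int) : ∀ (prev : Int) (out : List Int),
    (pvDelta prev vals).foldl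
      (fun (s : Int × List Int) d => (s.1 + d, s.2 ++ [1 + (s.1 + d)])) (prev - 1, out)
      = (vals.getLastD prev - 1, out ++ vals) := by
  induction vals with
  | nil => intro prev out; simp [pvDelta]
  | cons a t ih =>
    intro prev out
    have h1 : prev - 1 + (a - prev) = a - 1 := by ring
    simp only [pvDelta, List.foldl_cons, h1]
    have h2 : 1 + (a - 1) = a := by ring
    rw [h2, ih a (out ++ [a]), getLastD_cons']
    simp

theorem foldl_zeros (z : Nat) : ∀ (acc : Int) (out : List Int),
    (List.replicate z (0 : Int)).foldl
      (fun (s : Int × List Int) d => (s.1 + d, s.2 ++ [1 + (s.1 + d)])) (acc, out)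
      = (acc, out ++ List.replicate z (1 + acc)) := by
  induction z with
  | zero => intro acc out; simp
  | succ z ih =>
    intro acc out
    simp only [List.replicate_succ, List.foldl_cons, Int.add_zero]
    rw [ih acc (out ++ [1 + acc])]
    simp [List.replicate_succ, List.append_assoc]

-- the diff list maintained by B, as a function of the canonical completed output
def pvDiffOf (out : List Int) (z : Nat) : List Int :=
  pvDelta 1 (out ++ [1]) ++ List.replicate z 0

theorem pvDiffOf_getD (out : List Int) (z : Nat) :
    (pvDiffOf out z).getD out.length 0 = 1 - out.getLastD 1 := by
  have h : pvDiffOf out z = pvDelta 1 out ++ (1 - out.getLastD 1) :: List.replicate z 0 := by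
    simp [pvDiffOf, pvDelta_append, pvDelta]
  rw [h, ← pvDelta_length 1 out, getD_mid]

theorem pvDiffOf_set (out : List Int) (z : Nat) (v : Int) :
    (pvDiffOf out z).set out.length (v - out.getLastD 1)
      = pvDelta 1 (out ++ [v]) ++ List.replicate z 0 := by
  have h : pvDiffOf out z = pvDelta 1 out ++ (1 - out.getLastD 1) :: List.replicate z 0 := by
    simp [pvDiffOf, pvDelta_append, pvDelta]
  rw [h, ← pvDelta_length 1 out, set_mid]
  simp [pvDelta_append, pvDelta]

-- closing a run of length `run` inside B's diff list = appending the run to the canonical output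
theorem pvDiffOf_close (out : List Int) (run z : Nat) (hz : run < z) :
    ((pvDiffOf out z).set out.length
        ((pvDiffOf out z).getD out.length 0 + ((run : Int)))).set (out.length + run + 1)
        (0 - (run : Int))
      = pvDiffOf (out ++ List.replicate (run + 1) ((run : Int) + 1)) (z - run - 1) := by
  have h1 : (pvDiffOf out z).getD out.length 0 + (run : Int)
      = ((run : Int) + 1) - out.getLastD 1 := by rw [pvDiffOf_getD]; ring
  rw [h1, pvDiffOf_set]
  have hlen : (pvDelta 1 (out ++ [(run : Int) + 1])).length = out.length + 1 := by
    simp [pvDelta_length]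
  have hsplit : pvDelta 1 (out ++ [(run : Int) + 1]) ++ List.replicate z 0
      = (pvDelta 1 (out ++ [(run : Int) + 1]) ++ List.replicate run 0)
        ++ (0 : Int) :: List.replicate (z - run - 1) 0 := by
    have h0 : (0 : Int) :: List.replicate (z - run - 1) 0 = List.replicate (z - run) 0 := by
      rw [← List.replicate_succ]; congr 1; omega
    have : List.replicate z (0 : Int)
        = List.replicate run 0 ++ (0 : Int) :: List.replicate (z - run - 1) 0 := by
      rw [h0, List.replicate_append_replicate]; congr 1; omega
    rw [this, List.append_assoc]
  rw [hsplit]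
  have hlen2 : (pvDelta 1 (out ++ [(run : Int) + 1]) ++ List.replicate run 0).length
      = out.length + run + 1 := by simp [pvDelta_length]; omega
  rw [← hlen2, set_mid]
  -- now show equality with pvDiffOf of the extended output
  have hrep : List.replicate (run + 1) ((run : Int) + 1)
      = ((run : Int) + 1) :: List.replicate run ((run : Int) + 1) := by
    rw [List.replicate_succ]
  have hlast : (List.replicate run ((run : Int) + 1)).getLastD ((run : Int) + 1)
      = (run : Int) + 1 := getLastD_replicate' _ _
  unfold pvDiffOf
  rw [List.append_assoc, hrep]
  rw [show (0:Int) - (run:Int) = 1 - ((run:Int)+1) from by ring]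
  simp only [List.cons_append, pvDelta_append, pvDelta, pvDelta_replicate,
    hlast, List.append_assoc, List.nil_append]

theorem getD_append_replicate_zero (xs : List Int) (z i : Nat) (h : xs.length ≤ i) :
    (xs ++ List.replicate z (0 : Int)).getD i 0 = 0 := by
  rw [List.getD_eq_getElem?_getD, List.getElem?_append_right h]
  rcases Nat.lt_or_ge (i - xs.length) z with hlt | hge
  · simp [hlt]
  · rw [List.getElem?_eq_none (by simpa using hge)]; rfl

theorem getLastD_concat' (v : Int) (xs : List Int) : ∀ (p : Int), (xs ++ [v]).getLastD p = v := by
  induction xs with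
  | nil => intro p; rfl
  | cons a t ih => intro p; rw [List.cons_append, getLastD_cons', ih]

-- main correspondence for B: the diff fold tracks the canonical run-building fold
theorem pv_diffmain (n : Nat) : ∀ (r out : List Int) (run k : Nat),
    k = out.length + run → k + r.length = n →
    (let st := (r.zipIdx k).foldl pvDiffStep (pvDiffOf out (n + 1 - out.length), out.length)
     let diff := st.1.set st.2 (st.1.getD st.2 0 + ((n : Int) - (st.2 : Int)))
     ((List.range (n + 1)).foldl
       (fun (s : Int × List Int) j =>
         let a := s.1 + diff.getD j 0
         (a, s.2 ++ [1 + a])) (0, [])).2)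
    = (let st := r.foldl pvRunStep (out, (run : Int))
       st.1 ++ List.replicate (st.2 + 1).toNat (st.2 + 1)) := by
  intro r
  induction r with
  | nil =>
    intro out run k hk hn
    simp only [List.length_nil] at hn
    have hl : out.length + run = n := by omega
    simp only [List.zipIdx_nil, List.foldl_nil]
    have hg : (pvDiffOf out (n + 1 - out.length)).getD out.length 0
        + ((n : Int) - (out.length : Int)) = ((run : Int) + 1) - out.getLastD 1 := by
      rw [pvDiffOf_getD]
      have : ((n : Int) - (out.length : Int)) = (run : Int) := by omega
      rw [this]; ring
    rw [hg, pvDiffOf_set]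
    set v : Int := (run : Int) + 1 with hv
    have hdlen : (pvDelta 1 (out ++ [v]) ++ List.replicate (n + 1 - out.length) 0).length
        = n + 2 := by simp [pvDelta_length]; omega
    rw [foldl_range_getD _ (n + 1) _ (by omega)]
    have htake : (pvDelta 1 (out ++ [v]) ++ List.replicate (n + 1 - out.length) 0).take (n + 1)
        = pvDelta 1 (out ++ [v]) ++ List.replicate run 0 := by
      rw [List.take_append]
      have h1 : (pvDelta 1 (out ++ [v])).length = out.length + 1 := by simp [pvDelta_length]
      rw [List.take_of_length_le (by omega), List.take_replicate]
      congr 2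
      omega
    rw [htake, List.foldl_append]
    have hfd := foldl_delta (out ++ [v]) 1 []
    rw [getLastD_concat'] at hfd
    norm_num at hfd
    rw [hfd]
    rw [foldl_zeros run (v - 1) (out ++ [v])]
    have hvv : 1 + (v - 1) = v := by ring
    have htn : (v).toNat = run + 1 := by omega
    simp [hvv, htn, List.replicate_succ, List.append_assoc]
  | cons a r' ih =>
    intro out run k hk hn
    simp only [List.length_cons] at hn
    rw [List.zipIdx_cons, List.foldl_cons]
    by_cases ha : a ≤ 0
    · -- close the current run
      have hz : run < n + 1 - out.length := by omega
      have hstep : pvDiffStep (pvDiffOf out (n + 1 - out.length), out.length) (a, k)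
          = (pvDiffOf (out ++ List.replicate (run + 1) ((run : Int) + 1))
              (n + 1 - out.length - run - 1), k + 1) := by
        simp only [pvDiffStep, if_pos ha]
        have hs : ((k : Int) - (out.length : Int)) = (run : Int) := by omega
        rw [hs]
        have hget0 : ((pvDiffOf out (n + 1 - out.length)).set out.length
              ((pvDiffOf out (n + 1 - out.length)).getD out.length 0 + (run : Int))).getD
              (k + 1) 0 = 0 := by
          have hrw : (pvDiffOf out (n + 1 - out.length)).getD out.length 0 + (run : Int)
              = ((run : Int) + 1) - out.getLastD 1 := by rw [pvDiffOf_getD]; ring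
          rw [hrw, pvDiffOf_set]
          exact getD_append_replicate_zero _ _ _ (by simp [pvDelta_length]; omega)
        rw [hget0]
        have := pvDiffOf_close out run (n + 1 - out.length) hz
        have hk1 : out.length + run + 1 = k + 1 := by omega
        rw [hk1] at this
        rw [this]
      rw [hstep]
      have hout' : (out ++ List.replicate (run + 1) ((run : Int) + 1)).length = k + 1 := by
        simp; omega
      have hz' : n + 1 - out.length - run - 1 = n + 1 - (k + 1) := by omega
      rw [hz']
      have ihx := ih (out ++ List.replicate (run + 1) ((run : Int) + 1)) 0 (k + 1)
        (by rw [hout']) (by omega)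
      simp only [Nat.cast_zero] at ihx
      rw [hout'] at ihx
      rw [ihx]
      have ht : ((run : Int) + 1).toNat = run + 1 := by omega
      simp [pvRunStep, ht, not_lt.mpr ha]
    · -- extend the current run
      have hstep : pvDiffStep (pvDiffOf out (n + 1 - out.length), out.length) (a, k)
          = (pvDiffOf out (n + 1 - out.length), out.length) := by
        simp [pvDiffStep, ha]
      rw [hstep]
      have ihx := ih out (run + 1) (k + 1) (by omega) (by omega)
      push_cast at ihx
      rw [ihx]
      simp [pvRunStep, lt_of_not_ge (fun h => ha (by omega))]

-- ===== A-side lemmas (range addition on a tail of 1s) =====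
theorem pvAddRange_replicate (size : Int) :
    ∀ (c : Nat) (out : List Int) (t : Nat), c ≤ t →
    pvAddRange size (out ++ List.replicate t 1) out.length (out.length + c)
      = out ++ List.replicate c (1 + size) ++ List.replicate (t - c) 1 := by
  intro c
  induction c with
  | zero => intro out t _; simp [pvAddRange]
  | succ c ih =>
    intro out t hct
    obtain ⟨t', rfl⟩ : ∃ t', t = t' + 1 := ⟨t - 1, by omega⟩
    have hrange : List.range' out.length ((out.length + (c+1)) - out.length)
        = out.length :: List.range' (out.length + 1) c := by
      have : (out.length + (c+1)) - out.length = c + 1 := by omega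
      rw [this, List.range'_succ]
    unfold pvAddRange
    rw [hrange]
    simp only [List.foldl_cons]
    have hget : (out ++ List.replicate (t'+1) (1:Int)).getD out.length 0 = 1 := by
      simp [List.getD]
    have hset : (out ++ List.replicate (t'+1) (1:Int)).set out.length (1 + size)
        = (out ++ [1 + size]) ++ List.replicate t' 1 := by
      rw [List.replicate_succ, List.set_append_right _ _ (le_refl _)]
      simp
    rw [hget, hset]
    have := ih (out ++ [1 + size]) t' (by omega)
    unfold pvAddRange at this
    have hlen : (out ++ [1 + size]).length = out.length + 1 := by simp
    rw [hlen] at this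
    have harg2 : (out.length + 1 + c) - (out.length + 1) = c := by omega
    rw [harg2] at this
    rw [this]
    simp [List.replicate_succ, List.append_assoc]

-- main loop correspondence for A, by induction on the remaining suffix
theorem pv_main (g : List Int) :
    ∀ (r out : List Int) (run k : Nat),
      r = g.drop k → k ≤ g.length → k = out.length + run →
      (let st := (List.range' k r.length).foldl
          (fun (st : List Int × Nat × Int) i =>
            let (sizes, l, size) := st
            if g.getD i 0 > 0 then (sizes, l, size + 1)
            else (pvAddRange size sizes l (i + 1), i + 1, 0))
          (out ++ List.replicate (r.length + 1 + run) 1, out.length, (run : Int))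
       pvAddRange st.2.2 st.1 st.2.1 (g.length + 1))
      = (let st := r.foldl pvRunStep (out, (run : Int))
         st.1 ++ List.replicate (st.2 + 1).toNat (st.2 + 1)) := by
  intro r
  induction r with
  | nil =>
    intro out run k hr hk hkl
    have hkg : g.length ≤ k := List.drop_eq_nil_iff.mp hr.symm
    simp only [List.length_nil, List.range'_zero, List.foldl_nil]
    have h0 : 0 + 1 + run = run + 1 := by omega
    have h1 : g.length + 1 = out.length + (run + 1) := by omega
    rw [h0, h1, pvAddRange_replicate (run : Int) (run + 1) out (run + 1) (le_refl _)]
    have ht : ((run : Int) + 1).toNat = run + 1 := by omega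
    simp [ht, Int.add_comm]
  | cons a r' ih =>
    intro out run k hr hk hkl
    have hka : g[k]? = some a := by
      have : (g.drop k)[0]? = some a := by rw [← hr]; rfl
      rwa [List.getElem?_drop, Nat.add_zero] at this
    have hklt : k < g.length := (List.getElem?_eq_some_iff.mp hka).1
    have hget : g.getD k 0 = a := by simp [List.getD, hka]
    have hdrop' : r' = g.drop (k + 1) := by
      have h2 : (g.drop k).drop 1 = g.drop (k + 1) := by rw [List.drop_drop]
      rw [← h2, ← hr]; rfl
    by_cases ha : a > 0
    · simp only [List.length_cons, List.range'_succ, List.foldl_cons, hget, if_pos ha,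
        pvRunStep]
      have ihx := ih out (run + 1) (k + 1) hdrop' (by omega) (by omega)
      push_cast at ihx
      have hc : r'.length + 1 + 1 + run = r'.length + 1 + (run + 1) := by omega
      rw [hc]
      simpa [pvRunStep, ha] using ihx
    · simp only [List.length_cons, List.range'_succ, List.foldl_cons, hget, if_neg ha,
        pvRunStep]
      have hhi : out.length + (run + 1) = k + 1 := by omega
      have haddr : pvAddRange (run : Int)
          (out ++ List.replicate (r'.length + 1 + 1 + run) 1) out.length (k + 1)
          = (out ++ List.replicate (run + 1) ((run : Int) + 1)) ++ List.replicate (r'.length + 1) 1 := by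
        have h3 := pvAddRange_replicate (run : Int) (run + 1) out (r'.length + 1 + 1 + run) (by omega)
        have h4 : r'.length + 1 + 1 + run - (run + 1) = r'.length + 1 := by omega
        rw [h4] at h3
        rw [← hhi]
        simpa [List.append_assoc, Int.add_comm] using h3
      rw [haddr]
      have hout' : (out ++ List.replicate (run + 1) ((run : Int) + 1)).length = k + 1 := by
        simp; omega
      have ihx := ih (out ++ List.replicate (run + 1) ((run : Int) + 1)) 0 (k + 1) hdrop'
        (by omega) (by simp; omega)
      simp only [Nat.cast_zero, Nat.add_zero] at ihx
      rw [hout'] at ihx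
      have ht : ((run : Int) + 1).toNat = run + 1 := by omega
      simpa [pvRunStep, ha, ht] using ihx

theorem measure_coalition_eq_runs (g : List Int) : measure_coalition g = pvRuns g := by
  unfold measure_coalition pvRuns
  have := pv_main g g [] 0 0 (by simp) (by omega) (by simp)
  simpa [List.range_eq_range'] using this

theorem measure_coalition_alt_eq_runs (g : List Int) : measure_coalition_alt g = pvRuns g := by
  unfold measure_coalition_alt pvRuns
  have := pv_diffmain g.length g [] 0 0 (by simp) (by simp)
  simpa [pvDiffOf, pvDelta] using this

-- ===== VERDICT (by name: the statement is the Claim_ definition above) =====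
theorem measure_coalition_spec : Claim_equal_measure_coalition := by
  intro g _
  unfold Spec_measure_coalition
  rw [measure_coalition_eq_runs, measure_coalition_alt_eq_runs]
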